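-- pv_equiv track=rewrite | github.com/ninjaravinja/QR-Code | Self-Written/qr-code.py | determine_encoding
-- ===== SOURCE A (Python) =====
-- def determine_encoding(data: str) -> str:
--     """
--     Returns 4 bits representing the encoding type to be used in the QR code; only supports up to byte mode for now
--         \tNumeric mode -> 0001
--         \tAlphanumeric Mode -> 0010
--         \tByte Mode -> 0011
--
--     :param data: The data to be encoded in the QR code
--     :type data: str
--     :return: Binary correlating to encoding modes
--     :rtype: str
--     """
--
--     digits = "0123456789"
--     alphanumeric_chars = "0123456789ABCDEFGHIJKLMNOPQRSTUVWXYZ $%*+-./:"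
--     iso_8859_1 = ''.join(chr(i) for i in range(256))
--
--     # Numeric mode
--     if all(i in digits for i in data):
--         return '0001'
--
--     # Alphanumeric mode
--     if all(i in alphanumeric_chars for i in data):
--         return '0010'
--
--     # Byte mode
--     # Possible issue:
--     # https://www.thonky.com/qr-code-tutorial/data-analysis#a-note-about-utf8
--     if all(i in iso_8859_1 for i in data):
--         return '0011'
--
--     # Not supporting other encodings yet, raises NotImplemented otherwise
--     raise NotImplementedError("Invalid encoding mode detected. Only Numeric, Alphanumeric, and Byte modes are implemented.")
-- ===== SOURCE B (Python) =====
-- def determine_encoding(data: str) -> str: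
--     """Character-code classification in one scan: per-character mode level from
--     ord ranges (digits 48-57, uppercase 65-90, a small punctuation set, else
--     byte if ord<256), keeping the maximum; result formatted as 4-bit binary."""
--     mode = 1
--     for c in data:
--         o = ord(c)
--         if 48 <= o <= 57:
--             continue
--         if 65 <= o <= 90 or c in " $%*+-./:":
--             if mode < 2:
--                 mode = 2
--         elif o < 256:
--             mode = 3
--         else:
--             raise NotImplementedError("Invalid encoding mode detected. Only Numeric, Alphanumeric, and Byte modes are implemented.")
--     return format(mode, '04b')
-- ===== Notes on version B (the rewrite author's own statement) =====
-- stated objective: alternative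
-- what changed: Replaces A's three staged whole-string membership scans over literal character tables by a single recursive scan that classifies each character via code-point range tests (48-57 digit, 65-90 or small punctuation set alphanumeric, <256 byte), keeps the maximum level, and formats it as a 4-bit binary string.
import Mathlib
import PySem

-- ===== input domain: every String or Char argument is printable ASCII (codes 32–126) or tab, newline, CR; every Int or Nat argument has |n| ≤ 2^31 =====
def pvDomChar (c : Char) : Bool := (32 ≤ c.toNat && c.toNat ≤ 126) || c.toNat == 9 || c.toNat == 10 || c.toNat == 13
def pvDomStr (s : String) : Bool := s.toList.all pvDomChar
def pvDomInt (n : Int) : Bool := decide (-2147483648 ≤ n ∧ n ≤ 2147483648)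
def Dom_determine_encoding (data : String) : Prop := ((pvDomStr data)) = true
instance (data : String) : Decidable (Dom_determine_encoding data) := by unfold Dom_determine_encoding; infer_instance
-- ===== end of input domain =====

-- B replaces A's three whole-string membership scans over literal character tables by one
-- recursive scan classifying each char by its code-point ranges, keeping the maximal mode,
-- formatted as a 4-bit binary string at the end (objective: alternative, same value).

-- ===== PORT A =====
def pvDigits : List Char := ['0','1','2','3','4','5','6','7','8','9']
def pvAlnum : List Char :=
  ['0','1','2','3','4','5','6','7','8','9',
   'A','B','C','D','E','F','G','H','I','J','K','L','M','N','O','P','Q','R','S','T','U','V','W','X','Y','Z',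
   ' ','$','%','*','+','-','.','/',':']
-- iso_8859_1 = ''.join(chr(i) for i in range(256))
def pvIso : List Char := (List.range 256).map (fun i => Char.ofNat i)

def determine_encoding (data : String) : String :=
  if data.toList.all (fun c => pvDigits.contains c) then "0001"
  else if data.toList.all (fun c => pvAlnum.contains c) then "0010"
  else if data.toList.all (fun c => pvIso.contains c) then "0011"
  else "raise: NotImplementedError"  -- A raises NotImplementedError here; unreachable on Dom (all chars < 256)

-- ===== PORT B =====
def pvSpecial : List Char := [' ','$','%','*','+','-','.','/',':']

-- the scan loop of Source B: recursion over the remaining characters, state = current mode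
def pvScan : List Char → Nat → Nat
  | [], mode => mode
  | c :: rest, mode =>
      let o := c.toNat
      if 48 ≤ o ∧ o ≤ 57 then
        pvScan rest mode
      else if (65 ≤ o ∧ o ≤ 90) ∨ pvSpecial.contains c then
        pvScan rest (if mode < 2 then 2 else mode)
      else if o < 256 then
        pvScan rest 3
      else
        pvScan rest 4  -- Source B raises NotImplementedError here; unreachable on Dom

-- format(mode, '04b'): binary digits of mode, left-padded with '0' to width 4
def pvBinDigits (n : Nat) : List Char :=
  if h : n = 0 then []
  else pvBinDigits (n / 2) ++ [if n % 2 = 1 then '1' else '0']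
  decreasing_by exact Nat.div_lt_self (Nat.pos_of_ne_zero h) (by omega)

def pvFmt04b (n : Nat) : String :=
  let ds := pvBinDigits n
  String.mk (List.replicate (4 - ds.length) '0' ++ ds)

def determine_encoding_alt (data : String) : String :=
  pvFmt04b (pvScan data.toList 1)

-- ===== PRECONDITION & SPEC =====
def Spec_determine_encoding (data : String) (out : String) : Prop := out = determine_encoding_alt data
instance (data : String) (out : String) : Decidable (Spec_determine_encoding data out) := by unfold Spec_determine_encoding; infer_instance

-- ===== CLAIM (what is proved, stated in full; the proofs are below) =====
def Claim_equal_determine_encoding : Prop := ∀ (data : String), Dom_determine_encoding data → Spec_determine_encoding data (determine_encoding data)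

-- ===== LEMMAS AND PROOFS =====

-- per-character classification level, as Source B's branches compute it
def pvLevel (c : Char) : Nat :=
  if 48 ≤ c.toNat ∧ c.toNat ≤ 57 then 1
  else if (65 ≤ c.toNat ∧ c.toNat ≤ 90) ∨ pvSpecial.contains c then 2
  else if c.toNat < 256 then 3
  else 4

lemma pvScan_eq_foldl (l : List Char) (m : Nat) (hm : 1 ≤ m ∧ m ≤ 3)
    (hlt : ∀ c ∈ l, c.toNat < 256) :
    pvScan l m = l.foldl (fun m c => max m (pvLevel c)) m := by
  induction l generalizing m with
  | nil => rfl
  | cons c rest ih =>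
      have hc : c.toNat < 256 := hlt c (List.mem_cons_self ..)
      have hrest : ∀ x ∈ rest, x.toNat < 256 := fun x hx => hlt x (List.mem_cons_of_mem _ hx)
      rw [pvScan, List.foldl_cons]
      unfold pvLevel
      split_ifs with h1 h2 hm2 h3
      · rw [ih m hm hrest]; congr 1; omega
      · rw [ih 2 (by omega) hrest]; congr 1; omega
      · rw [ih m hm hrest]; congr 1; omega
      · rw [ih 3 (by omega) hrest]; congr 1; omega

lemma foldl_max_le_iff (l : List Char) (m k : Nat) :
    l.foldl (fun m c => max m (pvLevel c)) m ≤ k ↔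
      m ≤ k ∧ ∀ c ∈ l, pvLevel c ≤ k := by
  induction l generalizing m with
  | nil => simp
  | cons a t ih =>
      rw [List.foldl_cons, ih, max_le_iff]
      constructor
      · rintro ⟨⟨h1, h2⟩, h3⟩
        refine ⟨h1, fun c hc => ?_⟩
        rcases List.mem_cons.mp hc with rfl | hc
        · exact h2
        · exact h3 c hc
      · rintro ⟨h1, h2⟩
        exact ⟨⟨h1, h2 a (List.mem_cons_self ..)⟩, fun c hc => h2 c (List.mem_cons_of_mem _ hc)⟩

lemma le_foldl_max (l : List Char) (m : Nat) :
    m ≤ l.foldl (fun m c => max m (pvLevel c)) m := by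
  induction l generalizing m with
  | nil => simp
  | cons a t ih =>
      rw [List.foldl_cons]
      exact le_trans (le_max_left _ _) (ih _)

lemma mem_digits_iff (c : Char) : c ∈ pvDigits ↔ (48 ≤ c.toNat ∧ c.toNat ≤ 57) := by
  constructor
  · intro h; fin_cases h <;> decide
  · rintro ⟨h1, h2⟩
    have hc : c = Char.ofNat c.toNat := (Char.ofNat_toNat c).symm
    interval_cases h : c.toNat <;> (rw [hc]; decide)

lemma mem_alnum_iff (c : Char) :
    c ∈ pvAlnum ↔ ((48 ≤ c.toNat ∧ c.toNat ≤ 57) ∨ (65 ≤ c.toNat ∧ c.toNat ≤ 90) ∨ pvSpecial.contains c) := by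
  constructor
  · intro h; fin_cases h <;> decide
  · rintro (⟨h1, h2⟩ | ⟨h1, h2⟩ | h)
    · have hc : c = Char.ofNat c.toNat := (Char.ofNat_toNat c).symm
      interval_cases h : c.toNat <;> (rw [hc]; decide)
    · have hc : c = Char.ofNat c.toNat := (Char.ofNat_toNat c).symm
      interval_cases h : c.toNat <;> (rw [hc]; decide)
    · have h' : c ∈ pvSpecial := by simpa using h
      fin_cases h' <;> decide

lemma level_eq_one_iff (c : Char) : pvLevel c = 1 ↔ c ∈ pvDigits := by
  rw [mem_digits_iff]; unfold pvLevel; split_ifs <;> simp_all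

lemma level_le_two_iff (c : Char) : pvLevel c ≤ 2 ↔ c ∈ pvAlnum := by
  rw [mem_alnum_iff]; unfold pvLevel; split_ifs <;> simp_all

lemma level_pos (c : Char) : 1 ≤ pvLevel c := by
  unfold pvLevel; split_ifs <;> omega

lemma level_le_three (c : Char) (h : c.toNat < 256) : pvLevel c ≤ 3 := by
  unfold pvLevel; split_ifs <;> omega

lemma iso_contains (c : Char) (h : c.toNat < 256) : c ∈ pvIso := by
  unfold pvIso
  exact List.mem_map.mpr ⟨c.toNat, List.mem_range.mpr h, Char.ofNat_toNat c⟩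

lemma dom_char_lt (c : Char) (h : pvDomChar c = true) : c.toNat < 256 := by
  unfold pvDomChar at h
  simp only [Bool.or_eq_true, Bool.and_eq_true, decide_eq_true_eq, beq_iff_eq] at h
  omega

lemma binDigits_zero : pvBinDigits 0 = [] := by rw [pvBinDigits]; rfl
lemma binDigits_one : pvBinDigits 1 = ['1'] := by rw [pvBinDigits]; simp [binDigits_zero]
lemma binDigits_two : pvBinDigits 2 = ['1', '0'] := by rw [pvBinDigits]; simp [binDigits_one]
lemma binDigits_three : pvBinDigits 3 = ['1', '1'] := by rw [pvBinDigits]; simp [binDigits_one]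

lemma fmt04b_one : pvFmt04b 1 = "0001" := by unfold pvFmt04b; rw [binDigits_one]; rfl
lemma fmt04b_two : pvFmt04b 2 = "0010" := by unfold pvFmt04b; rw [binDigits_two]; rfl
lemma fmt04b_three : pvFmt04b 3 = "0011" := by unfold pvFmt04b; rw [binDigits_three]; rfl

-- ===== VERDICT (by name: the statement is the Claim_ definition above) =====
theorem determine_encoding_spec : Claim_equal_determine_encoding := by
  intro data hdom
  unfold Spec_determine_encoding determine_encoding determine_encoding_alt
  set l := data.toList with hl
  have hlt : ∀ c ∈ l, c.toNat < 256 := fun c hc =>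
    dom_char_lt c ((List.all_eq_true.mp hdom) c hc)
  rw [pvScan_eq_foldl l 1 (by omega) hlt]
  have h1le := le_foldl_max l 1
  have h3 : l.foldl (fun m c => max m (pvLevel c)) 1 ≤ 3 :=
    (foldl_max_le_iff l 1 3).mpr ⟨by omega, fun c hc => level_le_three c (hlt c hc)⟩
  split_ifs with hA1 hA2 hA3
  · -- all digits
    simp only [List.all_eq_true, List.contains_eq_mem, decide_eq_true_eq] at hA1
    have hmode : l.foldl (fun m c => max m (pvLevel c)) 1 = 1 :=
      le_antisymm
        ((foldl_max_le_iff l 1 1).mpr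
          ⟨le_refl _, fun c hc => le_of_eq ((level_eq_one_iff c).mpr (hA1 c hc))⟩)
        h1le
    rw [hmode, fmt04b_one]
  · -- alphanumeric, not all digits
    simp only [List.all_eq_true, List.contains_eq_mem, decide_eq_true_eq] at hA1 hA2
    have hne1 : l.foldl (fun m c => max m (pvLevel c)) 1 ≠ 1 := by
      intro h
      exact hA1 fun c hc =>
        (level_eq_one_iff c).mp
          (le_antisymm (((foldl_max_le_iff l 1 1).mp (le_of_eq h)).2 c hc) (level_pos c))
    have h2 : l.foldl (fun m c => max m (pvLevel c)) 1 ≤ 2 :=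
      (foldl_max_le_iff l 1 2).mpr
        ⟨by omega, fun c hc => (level_le_two_iff c).mpr (hA2 c hc)⟩
    have hmode : l.foldl (fun m c => max m (pvLevel c)) 1 = 2 := by omega
    rw [hmode, fmt04b_two]
  · -- byte mode
    simp only [List.all_eq_true, List.contains_eq_mem, decide_eq_true_eq] at hA1 hA2
    have hne1 : l.foldl (fun m c => max m (pvLevel c)) 1 ≠ 1 := by
      intro h
      exact hA1 fun c hc =>
        (level_eq_one_iff c).mp
          (le_antisymm (((foldl_max_le_iff l 1 1).mp (le_of_eq h)).2 c hc) (level_pos c))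
    have hne2 : l.foldl (fun m c => max m (pvLevel c)) 1 ≠ 2 := by
      intro h
      exact hA2 fun c hc =>
        (level_le_two_iff c).mp (((foldl_max_le_iff l 1 2).mp (le_of_eq h)).2 c hc)
    have hmode : l.foldl (fun m c => max m (pvLevel c)) 1 = 3 := by omega
    rw [hmode, fmt04b_three]
  · -- unreachable on Dom: every char is < 256, hence in pvIso
    exact absurd
      (by
        simp only [List.all_eq_true, List.contains_eq_mem, decide_eq_true_eq]
        exact fun c hc => iso_contains c (hlt c hc))
      hA3
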